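-- pv_equiv track=rewrite | github.com/kvasszn/ree-save-editor | rev/scan_blowfish.py | contains_english_word
-- ===== SOURCE A (Python) =====
-- def contains_english_word(key_str, word_set):
--     """Checks if any substring of length 5+ is a valid English word."""
--     if not word_set:
--         return False
--
--     s_lower = key_str.lower()
--     n = len(s_lower)
--
--     # Check every possible substring from length 5 up to the full string length
--     for length in range(5, n + 1):
--         for i in range(n - length + 1):
--             if s_lower[i:i+length] in word_set:
--                 return True
--
--     return False
-- ===== SOURCE B (Python) =====
-- def contains_english_word(key_str, word_set):
--     """Checks if any substring of length 5+ is a valid English word.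
--     B: word-driven search -- a qualifying substring exists iff some word of
--     length >= 5 occurs in the lowercased string, so make one pass over the
--     word set with one substring search per word."""
--     s = key_str.lower()
--     return any(len(w) >= 5 and w in s for w in word_set)
-- ===== Notes on version B (the rewrite author's own statement) =====
-- stated objective: simpler
-- what changed: A enumerates every substring of length 5..n and tests it against the word collection; B inverts the search: one pass over the word set, asking for each word of length >= 5 whether it occurs in the lowercased string (one substring search per word, no substring enumeration).
import Mathlib
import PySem

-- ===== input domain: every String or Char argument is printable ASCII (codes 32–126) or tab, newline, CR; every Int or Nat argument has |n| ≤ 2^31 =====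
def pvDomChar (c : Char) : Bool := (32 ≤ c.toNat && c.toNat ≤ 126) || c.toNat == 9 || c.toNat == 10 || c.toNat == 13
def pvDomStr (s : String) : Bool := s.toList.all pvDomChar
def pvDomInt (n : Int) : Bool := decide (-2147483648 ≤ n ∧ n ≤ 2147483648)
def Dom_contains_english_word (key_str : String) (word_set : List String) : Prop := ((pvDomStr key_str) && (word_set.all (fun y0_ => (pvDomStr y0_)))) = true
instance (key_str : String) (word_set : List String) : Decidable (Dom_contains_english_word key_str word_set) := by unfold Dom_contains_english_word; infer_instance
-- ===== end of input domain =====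

-- ===== PORT A =====
def contains_english_word (key_str : String) (word_set : List String) : Bool :=
  if word_set.isEmpty then false
  else
    let s := PySem.Chars.lower key_str.toList
    let n : Int := s.length
    (PySem.List.pyRange 5 (n + 1) 1).any fun length =>
      (PySem.List.pyRange 0 (n - length + 1) 1).any fun i =>
        word_set.any fun w => PySem.Chars.slice s (some i) (some (i + length)) == w.toList

-- ===== PORT B =====
-- B: word-driven search — one pass over the word set, one substring search per
-- word of length ≥ 5 in the lowercased string; no substring enumeration.
def contains_english_word_alt (key_str : String) (word_set : List String) : Bool :=
  let s := PySem.Chars.lower key_str.toList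
  word_set.any fun w => decide (5 ≤ w.toList.length) && PySem.Chars.isIn w.toList s

-- ===== PRECONDITION & SPEC =====
def Spec_contains_english_word (key_str : String) (word_set : List String) (out : Bool) : Prop := out = contains_english_word_alt key_str word_set
instance (key_str : String) (word_set : List String) (out : Bool) : Decidable (Spec_contains_english_word key_str word_set out) := by unfold Spec_contains_english_word; infer_instance

-- ===== CLAIM (what is proved, stated in full; the proofs are below) =====
def Claim_equal_contains_english_word : Prop := ∀ (key_str : String) (word_set : List String), Dom_contains_english_word key_str word_set → Spec_contains_english_word key_str word_set (contains_english_word key_str word_set)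

-- ===== LEMMAS AND PROOFS =====

-- the common characterisation: some word of word_set occurs in s as a substring of length ≥ 5
def GoodSub (s : List Char) (word_set : List String) : Prop :=
  ∃ w ∈ word_set, ∃ i L : Nat, 5 ≤ L ∧ i + L ≤ s.length ∧ (s.drop i).take L = w.toList

lemma a_iff (s : List Char) (ws : List String) :
    ((PySem.List.pyRange 5 ((s.length : Int) + 1) 1).any fun length =>
      (PySem.List.pyRange 0 ((s.length : Int) - length + 1) 1).any fun i =>
        ws.any fun w => PySem.Chars.slice s (some i) (some (i + length)) == w.toList) = true
    ↔ GoodSub s ws := by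
  simp only [List.any_eq_true, PySem.List.mem_pyRange_one, PySem.Chars.slice_eq_listSlice,
    beq_iff_eq]
  constructor
  · rintro ⟨len, ⟨h5, hlt⟩, i, ⟨hi0, hilt⟩, w, hw, hslice⟩
    refine ⟨w, hw, i.toNat, len.toNat, by omega, by omega, ?_⟩
    rw [PySem.List.slice_toNat s hi0 (by omega)] at hslice
    have h : (i + len).toNat - i.toNat = len.toNat := by omega
    rw [h] at hslice
    exact hslice
  · rintro ⟨w, hw, i, L, h5, hle, heq⟩
    refine ⟨(L : Int), ⟨by omega, by omega⟩, (i : Int), ⟨by omega, by omega⟩, w, hw, ?_⟩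
    rw [PySem.List.slice_natCast_add s i L]
    exact heq

-- the take/drop form of GoodSub's inner condition is exactly an infix occurrence
lemma infix_iff_drop_take (w s : List Char) :
    w <:+: s ↔ ∃ i : Nat, i + w.length ≤ s.length ∧ (s.drop i).take w.length = w := by
  constructor
  · rintro ⟨t, u, rfl⟩
    refine ⟨t.length, by simp, ?_⟩
    rw [List.append_assoc, List.drop_left, List.take_left]
  · rintro ⟨i, hle, heq⟩
    calc w = (s.drop i).take w.length := heq.symm
    _ <:+: s.drop i := (List.take_prefix _ _).isInfix
    _ <:+: s := (List.drop_suffix _ _).isInfix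

lemma b_iff (s : List Char) (ws : List String) :
    (ws.any fun w => decide (5 ≤ w.toList.length) && PySem.Chars.isIn w.toList s) = true
    ↔ GoodSub s ws := by
  simp only [List.any_eq_true, Bool.and_eq_true, decide_eq_true_eq, PySem.Chars.isIn_iff_infix,
    infix_iff_drop_take]
  constructor
  · rintro ⟨w, hw, h5, i, hle, heq⟩
    exact ⟨w, hw, i, w.toList.length, h5, hle, heq⟩
  · rintro ⟨w, hw, i, L, h5, hle, heq⟩
    have hlen : w.toList.length = L := by rw [← heq]; simp; omega
    exact ⟨w, hw, by omega, i, by omega, by rw [hlen]; exact heq⟩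

-- ===== VERDICT (by name: the statement is the Claim_ definition above) =====
theorem contains_english_word_spec : Claim_equal_contains_english_word := by
  intro key_str word_set _
  unfold Spec_contains_english_word contains_english_word contains_english_word_alt
  by_cases hws : word_set.isEmpty
  · simp [List.isEmpty_iff.1 hws]
  · simp only [hws, Bool.false_eq_true, if_false]
    rw [Bool.eq_iff_iff, a_iff, b_iff]
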